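-- pv_equiv track=rewrite | github.com/Nev-l/legends-builder | builder/app.py | _read_rect
-- ===== SOURCE A (Python) =====
-- def _read_rect(data, off):
--     """Parse SWF RECT bit-field. Returns (xmin_px, ymin_px, width_px, height_px, bytes_consumed)."""
--     nb = data[off] >> 3
--     if nb == 0:
--         return 0, 0, 0, 0, 1
--     tb = 5 + nb * 4
--     nb_bytes = (tb + 7) // 8
--     val = 0
--     for i in range(nb_bytes):
--         val = (val << 8) | data[off + i]
--     val >>= (nb_bytes * 8 - tb)
--     mask = (1 << nb) - 1
--     def s(v):
--         return v - (1 << nb) if v >= (1 << (nb - 1)) else v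
--     xmin = s((val >> (3 * nb)) & mask)
--     xmax = s((val >> (2 * nb)) & mask)
--     ymin = s((val >>      nb)  & mask)
--     ymax = s( val              & mask)
--     xmin_px = xmin // 20
--     ymin_px = ymin // 20
--     w = max(0, (xmax - xmin) // 20)
--     h = max(0, (ymax - ymin) // 20)
--     return xmin_px, ymin_px, w, h, nb_bytes
-- ===== SOURCE B (Python) =====
-- def _read_rect(data, off):
--     """Parse SWF RECT via an incremental bit-stream reader (streams bytes as needed
--     instead of assembling the whole field into one big integer first)."""
--     acc = 0      # buffered, not-yet-consumed bits (low `bits` bits of acc)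
--     bits = 0     # number of buffered bits
--     pos = off    # next byte to pull
--
--     def read(n):
--         nonlocal acc, bits, pos
--         while bits < n:
--             acc = (acc << 8) | data[pos]
--             pos += 1
--             bits += 8
--         bits -= n
--         res = (acc >> bits) & ((1 << n) - 1)
--         acc &= (1 << bits) - 1
--         return res
--
--     def sext(v, n):
--         return v - (1 << n) if v >= (1 << (n - 1)) else v
--
--     nb = read(5)
--     if nb == 0:
--         return 0, 0, 0, 0, pos - off
--     xmin = sext(read(nb), nb)
--     xmax = sext(read(nb), nb)
--     ymin = sext(read(nb), nb)
--     ymax = sext(read(nb), nb)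
--     return xmin // 20, ymin // 20, max(0, (xmax - xmin) // 20), max(0, (ymax - ymin) // 20), pos - off
-- ===== Notes on version B (the rewrite author's own statement) =====
-- stated objective: alternative
-- what changed: Replaces A's assemble-everything-then-shift scheme (build one big integer from all nb_bytes, right-align it, extract each field with a separately computed shift) by an incremental bit-stream reader that keeps only a small buffer of unconsumed bits and pulls bytes lazily as each field is read. Pre_ excludes inputs whose accessed entries are not byte values 0-255 (the natural SWF byte-stream domain): on out-of-range or negative 'bytes' A's overlapping-OR assembly yields accidental values the streaming reader does not reproduce.
-- outside the precondition, e.g. on _read_rect([8, 300], 0): A returns (0, -1, 0, 0, 2), B returns (0, 0, 0, 0, 2)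
import Mathlib
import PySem

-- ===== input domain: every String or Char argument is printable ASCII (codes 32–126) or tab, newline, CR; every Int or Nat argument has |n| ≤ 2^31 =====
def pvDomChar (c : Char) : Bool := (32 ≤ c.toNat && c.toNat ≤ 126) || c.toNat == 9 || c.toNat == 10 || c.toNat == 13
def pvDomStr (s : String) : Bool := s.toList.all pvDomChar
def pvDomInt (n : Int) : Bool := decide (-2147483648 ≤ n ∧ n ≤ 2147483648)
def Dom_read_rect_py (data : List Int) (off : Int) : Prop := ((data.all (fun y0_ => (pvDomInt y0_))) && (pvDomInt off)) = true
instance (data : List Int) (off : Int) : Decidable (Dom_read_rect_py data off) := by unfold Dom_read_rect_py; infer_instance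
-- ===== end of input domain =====

-- B replaces A's build-one-big-integer-then-shift parsing by an incremental bit-stream
-- reader (lazy byte pulls, a buffer of unconsumed bits); objective: alternative.

-- ===== PORT A =====
-- data[j] (possibly negative j, Python wraparound); Pre_ guarantees the lookup succeeds
def pvByte (data : List Int) (j : Int) : Int := (PySem.List.pyGet? data j).getD 0

def read_rect_py (data : List Int) (off : Int) : Int × Int × Int × Int × Int :=
  let nb : Int := pvByte data off >>> (3:Nat)         -- nb = data[off] >> 3
  if nb = 0 then (0, 0, 0, 0, 1)
  else
    let tb := 5 + nb * 4
    let nbBytes := PySem.Int.floordiv (tb + 7) 8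
    -- for i in range(nb_bytes): val = (val << 8) | data[off + i]
    let val0 := (PySem.List.pyRange 0 nbBytes 1).foldl
        (fun v i => PySem.Int.bor (v <<< (8:Nat)) (pvByte data (off + i))) 0
    -- val >>= nb_bytes * 8 - tb   (the shift count is ≥ 0 whenever nb ≥ 1)
    let val := val0 >>> (nbBytes * 8 - tb).toNat
    let mask := (1 : Int) <<< nb.toNat - 1
    -- s(v) = v - (1 << nb) if v >= 1 << (nb - 1) else v  (nb ≥ 1 on Pre_, so .toNat is exact)
    let s : Int → Int := fun v => if (1 : Int) <<< (nb - 1).toNat ≤ v then v - (1 : Int) <<< nb.toNat else v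
    let xmin := s (PySem.Int.band (val >>> (3 * nb).toNat) mask)
    let xmax := s (PySem.Int.band (val >>> (2 * nb).toNat) mask)
    let ymin := s (PySem.Int.band (val >>> nb.toNat) mask)
    let ymax := s (PySem.Int.band val mask)
    (PySem.Int.floordiv xmin 20, PySem.Int.floordiv ymin 20,
     max 0 (PySem.Int.floordiv (xmax - xmin) 20),
     max 0 (PySem.Int.floordiv (ymax - ymin) 20), nbBytes)

-- ===== PORT B =====
-- bit-stream reader state: (acc = buffered bits, bits = how many, pos = next byte index)
def pvPull (data : List Int) : (Int × Int × Int) → Nat → Int × Int × Int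
  | st, 0 => st
  | (acc, bits, pos), k+1 =>
      pvPull data (PySem.Int.bor (acc <<< (8:Nat)) (pvByte data pos), bits + 8, pos + 1) k

def pvRead (data : List Int) (st : Int × Int × Int) (n : Int) : Int × (Int × Int × Int) :=
  -- the `while bits < n` loop of Source B runs ceil((n - bits) / 8) times
  let k : Nat := if st.2.1 < n then (PySem.Int.floordiv (n - st.2.1 + 7) 8).toNat else 0
  let st' := pvPull data st k
  let bits := st'.2.1 - n
  let res := PySem.Int.band (st'.1 >>> bits.toNat) ((1 : Int) <<< n.toNat - 1)
  let acc := PySem.Int.band st'.1 ((1 : Int) <<< bits.toNat - 1)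
  (res, (acc, bits, st'.2.2))

-- sext(v, n) = v - (1 << n) if v >= 1 << (n - 1) else v
def pvSext (v n : Int) : Int :=
  if (1 : Int) <<< (n - 1).toNat ≤ v then v - (1 : Int) <<< n.toNat else v

def read_rect_py_alt (data : List Int) (off : Int) : Int × Int × Int × Int × Int :=
  let r0 := pvRead data (0, 0, off) 5
  let nb := r0.1
  if nb = 0 then (0, 0, 0, 0, r0.2.2.2 - off)
  else
    let r1 := pvRead data r0.2 nb
    let r2 := pvRead data r1.2 nb
    let r3 := pvRead data r2.2 nb
    let r4 := pvRead data r3.2 nb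
    let xmin := pvSext r1.1 nb
    let xmax := pvSext r2.1 nb
    let ymin := pvSext r3.1 nb
    let ymax := pvSext r4.1 nb
    (PySem.Int.floordiv xmin 20, PySem.Int.floordiv ymin 20,
     max 0 (PySem.Int.floordiv (xmax - xmin) 20),
     max 0 (PySem.Int.floordiv (ymax - ymin) 20), r4.2.2.2 - off)

-- ===== PRECONDITION & SPEC =====
def pvIsByte (o : Option Int) : Bool :=
  match o with
  | none => false
  | some b => decide (0 ≤ b) && decide (b < 256)

-- number of bytes the parse touches, read off the first byte b0
def pvNBytes (b0 : Int) : Int :=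
  if b0 >>> (3:Nat) = 0 then 1 else PySem.Int.floordiv (5 + (b0 >>> (3:Nat)) * 4 + 7) 8

-- Pre_ excludes inputs whose accessed entries are not byte values 0-255 (the natural SWF
-- byte-stream domain): on non-byte entries A's overlapping-OR assembly yields accidental
-- values; and it excludes the out-of-range accesses on which A raises IndexError.
def Pre_read_rect_py (data : List Int) (off : Int) : Prop :=
  pvIsByte (PySem.List.pyGet? data off) = true ∧
  ∀ i ∈ PySem.List.pyRange 0 (pvNBytes (pvByte data off)) 1,
    pvIsByte (PySem.List.pyGet? data (off + i)) = true

instance (data : List Int) (off : Int) : Decidable (Pre_read_rect_py data off) := by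
  unfold Pre_read_rect_py; infer_instance

def pvWitness_read_rect_py : List Int × Int := ([8, 0], 0)

def Spec_read_rect_py (data : List Int) (off : Int) (out : Int × Int × Int × Int × Int) : Prop := out = read_rect_py_alt data off
instance (data : List Int) (off : Int) (out : Int × Int × Int × Int × Int) : Decidable (Spec_read_rect_py data off out) := by unfold Spec_read_rect_py; infer_instance

-- ===== CLAIM (what is proved, stated in full; the proofs are below) =====
def Claim_equal_read_rect_py : Prop := ∀ (data : List Int) (off : Int), Dom_read_rect_py data off → Pre_read_rect_py data off → Spec_read_rect_py data off (read_rect_py data off)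

-- ===== LEMMAS AND PROOFS =====

-- the stream value of the first j bytes after data[off]
def pvAcc (data : List Int) (off : Int) : Nat → Int
  | 0 => 0
  | j+1 => pvAcc data off j * 256 + pvByte data (off + (j : Int))

lemma pv_nat_or (a b : Nat) (h : b < 2^8) : (2^8 * a) ||| b = 2^8 * a + b := by
  apply Nat.eq_of_testBit_eq
  intro j
  have h0 : (2^8 * a + 0).testBit j = if j < 8 then Nat.testBit 0 j else a.testBit (j - 8) :=
    Nat.testBit_two_pow_mul_add a (by norm_num) j
  rw [Nat.testBit_lor, Nat.testBit_two_pow_mul_add a h j]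
  rw [Nat.add_zero] at h0
  rw [h0]
  by_cases hj : j < 8
  · simp [hj]
  · simp [hj, Nat.testBit_lt_two_pow
      (lt_of_lt_of_le h (Nat.pow_le_pow_right (by norm_num) (Nat.le_of_not_lt hj)))]

lemma pv_bor_byte (v b : Int) (hv : 0 ≤ v) (hb : 0 ≤ b) (h : b < 256) :
    PySem.Int.bor (v <<< (8:Nat)) b = v * 256 + b := by
  have h8 : v <<< (8:Nat) = v * 256 := by rw [Int.shiftLeft_eq]; norm_num
  have hvn : (0:Int) ≤ v * 256 := by positivity
  rw [h8, PySem.Int.bor_of_nonneg hvn hb]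
  have h1 : (v * 256).toNat = 2^8 * v.toNat := by omega
  have h2 : b.toNat < 2^8 := by omega
  rw [h1, pv_nat_or _ _ h2]
  push_cast
  omega

lemma pv_shr (x : Int) (k : Nat) : x >>> k = x / 2^k := by
  rw [Int.shiftRight_eq_div_pow]; push_cast; ring_nf

lemma pv_band_mask (x : Int) (n : Nat) (hx : 0 ≤ x) :
    PySem.Int.band x ((1 : Int) <<< n - 1) = x % 2^n := by
  have h1 : (1:Int) <<< n - 1 = 2^n - 1 := by rw [Int.shiftLeft_eq]; ring
  have hp : (1:Int) ≤ 2^n := one_le_pow₀ (by norm_num)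
  rw [h1, PySem.Int.band_of_nonneg hx (by omega)]
  have h2 : ((2:Int)^n - 1).toNat = 2^n - 1 := by
    have : (2:Int)^n = ((2^n : Nat) : Int) := by push_cast; ring
    omega
  rw [h2, Nat.and_two_pow_sub_one_eq_mod]
  conv_rhs => rw [← Int.toNat_of_nonneg hx]
  push_cast
  ring

lemma pv_mod_div (x : Int) (b n : Nat) (hx : 0 ≤ x) : x % 2^(b+n) / 2^b = x / 2^b % 2^n := by
  obtain ⟨m, rfl⟩ := Int.eq_ofNat_of_zero_le hx
  have := Nat.mod_mul_right_div_self m (2^b) (2^n)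
  rw [← pow_add] at this
  exact_mod_cast this

lemma pv_pad_div (a r : Int) (s m : Nat) (hr : 0 ≤ r) (hlt : r < 2^s) (hm : s ≤ m) :
    (a * 2^s + r) / 2^m = a / 2^(m - s) := by
  have hpow : (2:Int)^m = 2^s * 2^(m-s) := by rw [← pow_add]; congr 1; omega
  rw [hpow, ← Int.ediv_ediv_eq_ediv_mul (by positivity)]
  congr 1
  rw [add_comm, Int.add_mul_ediv_right r a (by positivity)]
  rw [Int.ediv_eq_zero_of_lt hr hlt]
  ring

lemma pv_modstep (x b : Int) (a : Nat) (hb : 0 ≤ b) (hb2 : b < 256) :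
    x % 2^a * 256 + b = (x * 256 + b) % 2^(a+8) := by
  have hdecomp : x * 256 + b = x % 2^a * 256 + b + 2^(a+8) * (x / 2^a) := by
    have := Int.ediv_add_emod x (2^a)
    have hp : (2:Int)^(a+8) = 2^a * 256 := by rw [pow_add]; norm_num
    rw [hp]; ring_nf; linarith [Int.ediv_add_emod x (2^a)]
  rw [hdecomp, Int.add_mul_emod_self_left]
  have h1 : 0 ≤ x % 2^a := Int.emod_nonneg x (by positivity)
  have h2 : x % 2^a < 2^a := Int.emod_lt_of_pos x (by positivity)
  have hp : (2:Int)^(a+8) = 2^a * 256 := by rw [pow_add]; norm_num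
  have h3 : x % 2^a * 256 + b < 2^(a+8) := by rw [hp]; nlinarith
  exact (Int.emod_eq_of_lt (by linarith) h3).symm

-- bounds for the accumulated prefix value
lemma pv_acc_bounds (data : List Int) (off : Int) (N : Nat)
    (hbz : ∀ j : Nat, j < N → 0 ≤ pvByte data (off + (j:Int)) ∧ pvByte data (off + (j:Int)) < 256) :
    ∀ j : Nat, j ≤ N → 0 ≤ pvAcc data off j ∧ pvAcc data off j < 2^(8*j) := by
  intro j
  induction j with
  | zero => intro _; simp [pvAcc]
  | succ j ih =>
    intro hj
    obtain ⟨h1, h2⟩ := ih (by omega)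
    obtain ⟨h3, h4⟩ := hbz j (by omega)
    have hpow : (2:Int)^(8*(j+1)) = 2^(8*j) * 256 := by rw [show 8*(j+1) = 8*j+8 by ring, pow_add]; norm_num
    constructor
    · simp only [pvAcc]; nlinarith
    · simp only [pvAcc]; rw [hpow]; nlinarith

-- the pull loop advances the window: k fresh bytes enter the buffer
lemma pv_pull_spec (data : List Int) (off : Int) (N : Nat)
    (hbz : ∀ j : Nat, j < N → 0 ≤ pvByte data (off + (j:Int)) ∧ pvByte data (off + (j:Int)) < 256) :
    ∀ (k p c : Nat) (bits : Int), c ≤ 8*p → p + k ≤ N →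
      pvPull data (pvAcc data off p % 2^(8*p - c), bits, off + (p:Int)) k
        = (pvAcc data off (p+k) % 2^(8*(p+k) - c), bits + 8*(k:Int), off + ((p+k : Nat) : Int)) := by
  intro k
  induction k with
  | zero => intro p c bits h1 h2; simp [pvPull]
  | succ k ih =>
    intro p c bits h1 h2
    obtain ⟨ha1, _⟩ := pv_acc_bounds data off N hbz p (by omega)
    obtain ⟨hb1, hb2⟩ := hbz p (by omega)
    have hmodnn : 0 ≤ pvAcc data off p % 2^(8*p - c) := Int.emod_nonneg _ (by positivity)
    simp only [pvPull]
    rw [pv_bor_byte _ _ hmodnn hb1 hb2]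
    rw [pv_modstep _ _ _ hb1 hb2]
    have hstep : (pvAcc data off p * 256 + pvByte data (off + (p:Int))) = pvAcc data off (p+1) := by
      simp [pvAcc]
    rw [hstep]
    have hexp : (8*p - c) + 8 = 8*(p+1) - c := by omega
    rw [hexp]
    have := ih (p+1) c (bits + 8) (by omega) (by omega)
    have hcast : off + (p:Int) + 1 = off + ((p+1 : Nat) : Int) := by push_cast; ring
    rw [hcast, this, show p+1+k = p+(k+1) from by ring]
    simp only [Prod.mk.injEq]
    refine ⟨trivial, by push_cast; ring, trivial⟩

-- foldl of A's assembly loop over range(j) is the prefix value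
lemma pv_fold_spec (data : List Int) (off : Int) (N : Nat)
    (hbz : ∀ j : Nat, j < N → 0 ≤ pvByte data (off + (j:Int)) ∧ pvByte data (off + (j:Int)) < 256) :
    ∀ j : Nat, j ≤ N →
      (PySem.List.pyRange 0 (j:Int) 1).foldl
          (fun v i => PySem.Int.bor (v <<< (8:Nat)) (pvByte data (off + i))) 0
        = pvAcc data off j := by
  intro j
  induction j with
  | zero => intro _; simp [pvAcc]
  | succ j ih =>
    intro hj
    have hcast : ((j+1 : Nat) : Int) = (j : Int) + 1 := by push_cast; ring
    rw [hcast, PySem.List.pyRange_one_succ_right (by positivity), List.foldl_append]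
    rw [ih (by omega)]
    simp only [List.foldl_cons, List.foldl_nil]
    obtain ⟨ha1, _⟩ := pv_acc_bounds data off N hbz j (by omega)
    obtain ⟨hb1, hb2⟩ := hbz j (by omega)
    rw [pv_bor_byte _ _ ha1 hb1 hb2]
    simp [pvAcc]

-- a field extracted below the first e bits only depends on the first ⌈e/8⌉ bytes
lemma pv_prefix (data : List Int) (off : Int) (N : Nat)
    (hbz : ∀ j : Nat, j < N → 0 ≤ pvByte data (off + (j:Int)) ∧ pvByte data (off + (j:Int)) < 256) :
    ∀ (p : Nat), p ≤ N → ∀ (j : Nat), j ≤ p → ∀ (e : Nat), e ≤ 8*j →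
      pvAcc data off p / 2^(8*p - e) = pvAcc data off j / 2^(8*j - e) := by
  intro p
  induction p with
  | zero => intro _ j hj e he; interval_cases j; rfl
  | succ p ih =>
    intro hp j hj e he
    rcases Nat.eq_or_lt_of_le hj with heq | hlt
    · rw [heq]
    · have hjp : j ≤ p := by omega
      rw [← ih (by omega) j hjp e he]
      obtain ⟨ha1, _⟩ := pv_acc_bounds data off N hbz p (by omega)
      obtain ⟨hb1, hb2⟩ := hbz p (by omega)
      have hb2' : pvByte data (off + (p:Int)) < 2^8 := by norm_num; exact hb2
      simp only [pvAcc]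
      rw [show (256:Int) = 2^8 from by norm_num]
      rw [pv_pad_div _ _ 8 (8*(p+1) - e) hb1 hb2' (by omega)]
      congr 2
      omega

-- one read(n): consumes bits c..c+n of the stream, pulling bytes as needed
lemma pv_read_spec (data : List Int) (off : Int) (N : Nat)
    (hbz : ∀ j : Nat, j < N → 0 ≤ pvByte data (off + (j:Int)) ∧ pvByte data (off + (j:Int)) < 256)
    (c p n : Nat) (hn : 0 < n) (h1 : c ≤ 8*p) (h2 : 8*p < c + 8) (hN : (c+n+7)/8 ≤ N) :
    pvRead data (pvAcc data off p % 2^(8*p - c), 8*(p:Int) - (c:Int), off + (p:Int)) (n:Int)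
      = (pvAcc data off ((c+n+7)/8) / 2^(8*((c+n+7)/8) - (c+n)) % 2^n,
         (pvAcc data off ((c+n+7)/8) % 2^(8*((c+n+7)/8) - (c+n)),
          8*(((c+n+7)/8 : Nat) : Int) - ((c+n : Nat) : Int),
          off + (((c+n+7)/8 : Nat) : Int))) := by
  set p' : Nat := (c+n+7)/8 with hp'
  have hp'1 : c + n ≤ 8 * p' := by omega
  have hp'2 : 8 * p' < c + n + 8 := by omega
  have hpp' : p ≤ p' := by omega
  simp only [pvRead]
  have hk : (if 8*(p:Int) - (c:Int) < (n:Int) then (PySem.Int.floordiv ((n:Int) - (8*(p:Int) - (c:Int)) + 7) 8).toNat else 0) = p' - p := by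
    split_ifs with hlt
    · rw [PySem.Int.floordiv_eq_ediv_of_pos (by norm_num)]
      omega
    · omega
  rw [hk]
  rw [pv_pull_spec data off N hbz (p' - p) p c _ h1 (by omega)]
  rw [show p + (p' - p) = p' from by omega]
  have hacc := pv_acc_bounds data off N hbz p' (by omega)
  have haccnn : 0 ≤ pvAcc data off p' % 2^(8*p' - c) := Int.emod_nonneg _ (by positivity)
  simp only
  have hbits : 8*(p:Int) - (c:Int) + 8*((p' - p : Nat) : Int) - (n:Int) = ((8*p' - (c+n) : Nat) : Int) := by omega
  have hbitsnat : (8*(p:Int) - (c:Int) + 8*((p' - p : Nat) : Int) - (n:Int)).toNat = 8*p' - (c+n) := by omega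
  rw [hbitsnat]
  have hsplit : 8*p' - c = (8*p' - (c+n)) + n := by omega
  simp only [Prod.mk.injEq]
  refine ⟨?_, ?_, ?_, trivial⟩
  · -- the extracted field
    rw [pv_shr, pv_band_mask _ _ (Int.ediv_nonneg haccnn (by positivity))]
    rw [show ((n:Int)).toNat = n from by omega]
    rw [hsplit, pv_mod_div _ _ _ (hacc.1)]
    exact Int.emod_emod_of_dvd _ dvd_rfl
  · -- the remaining buffer
    rw [pv_band_mask _ _ haccnn]
    rw [hsplit, pow_add]
    rw [Int.emod_emod_of_dvd _ (Dvd.intro _ rfl)]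
  · rw [hbits]; push_cast; omega


-- Pre_'s byte condition, in the indexed form the lemmas above consume
lemma pv_bytes_of_pre (data : List Int) (off : Int) (N : Nat)
    (h : ∀ i ∈ PySem.List.pyRange 0 (N:Int) 1, pvIsByte (PySem.List.pyGet? data (off + i)) = true) :
    ∀ j : Nat, j < N → 0 ≤ pvByte data (off + (j:Int)) ∧ pvByte data (off + (j:Int)) < 256 := by
  intro j hj
  have hmem : (j:Int) ∈ PySem.List.pyRange 0 (N:Int) 1 := by
    rw [PySem.List.mem_pyRange_one]
    constructor
    · positivity
    · exact_mod_cast hj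
  have := h (j:Int) hmem
  cases hgj : PySem.List.pyGet? data (off + (j:Int)) with
  | none => rw [hgj] at this; simp [pvIsByte] at this
  | some b =>
    rw [hgj] at this
    simp only [pvIsByte, Bool.and_eq_true, decide_eq_true_eq] at this
    simp [pvByte, hgj]
    omega

-- ===== VERDICT (by name: the statement is the Claim_ definition above) =====
theorem read_rect_py_spec : Claim_equal_read_rect_py := by
  intro data off _ hpre
  unfold Spec_read_rect_py
  obtain ⟨h0, hall⟩ := hpre
  cases hg : PySem.List.pyGet? data off with
  | none => rw [hg] at h0; simp [pvIsByte] at h0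
  | some b0 =>
  rw [hg] at h0
  simp only [pvIsByte, Bool.and_eq_true, decide_eq_true_eq] at h0
  obtain ⟨hb0l, hb0u⟩ := h0
  have hbyte0 : pvByte data off = b0 := by simp [pvByte, hg]
  have hshr : b0 >>> (3:Nat) = ((b0.toNat / 8 : Nat) : Int) := by
    rw [pv_shr]; norm_num; omega
  set nbn : Nat := b0.toNat / 8 with hnbn
  by_cases hz : nbn = 0
  · have hz' : b0 >>> (3:Nat) = 0 := by rw [hshr, hz]; norm_num
    have hA : read_rect_py data off = (0,0,0,0,1) := by
      simp [read_rect_py, hbyte0, hz']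
    have hNb : pvNBytes (pvByte data off) = ((1:Nat) : Int) := by
      simp [pvNBytes, hbyte0, hz']
    rw [hNb] at hall
    have hbz := pv_bytes_of_pre data off 1 hall
    have hr0 := pv_read_spec data off 1 hbz 0 0 5 (by norm_num) (by norm_num) (by norm_num) (by norm_num)
    have hacc1 : pvAcc data off 1 = b0 := by
      simp [pvAcc, pvByte, hg]
    norm_num [hacc1] at hr0
    have hfld : b0 / 8 % 32 = 0 := by omega
    rw [hfld] at hr0
    simp only [read_rect_py_alt, hr0]
    norm_num [hA]
  · -- main case: nbn = data[off] >> 3 ≥ 1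
    have hnb1 : 1 ≤ nbn := by omega
    have hnb31 : nbn ≤ 31 := by omega
    set N : Nat := (5 + nbn*4 + 7)/8 with hNdef
    have hfl : PySem.Int.floordiv (5 + (nbn:Int) * 4 + 7) 8 = (N:Int) := by
      rw [show (5 + (nbn:Int)*4 + 7) = ((5+nbn*4+7 : Nat):Int) from by push_cast; ring,
         show (8:Int) = ((8:Nat):Int) from by norm_num, PySem.Int.floordiv_natCast]
    have hNb : pvNBytes (pvByte data off) = (N:Int) := by
      rw [pvNBytes, hbyte0, hshr]
      rw [if_neg (by exact_mod_cast hz)]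
      exact hfl
    rw [hNb] at hall
    have hbz := pv_bytes_of_pre data off N hall
    have hFnn : 0 ≤ pvAcc data off N := (pv_acc_bounds data off N hbz N le_rfl).1
    have hone : ∀ k : Nat, (1:Int) <<< k = 2^k := fun k => by rw [Int.shiftLeft_eq, one_mul]
    have hnz : ¬((nbn:Int) = 0) := by exact_mod_cast hz
    have hacc1 : pvAcc data off 1 = b0 := by simp [pvAcc, pvByte, hg]
    have hr0 := pv_read_spec data off N hbz 0 0 5 (by norm_num) (by norm_num) (by norm_num) (by omega)
    norm_num [hacc1] at hr0
    rw [show b0 / 8 % 32 = ((nbn:Nat):Int) from by omega] at hr0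
    have hr1 := pv_read_spec data off N hbz 5 1 nbn hnb1 (by omega) (by omega) (by omega)
    norm_num [hacc1] at hr1
    have hr2 := pv_read_spec data off N hbz (5+nbn) ((5+nbn+7)/8) nbn hnb1 (by omega) (by omega) (by omega)
    norm_num at hr2
    have hr3 := pv_read_spec data off N hbz (5+nbn+nbn) ((5+nbn+nbn+7)/8) nbn hnb1 (by omega) (by omega) (by omega)
    norm_num at hr3
    have hr4 := pv_read_spec data off N hbz (5+nbn+nbn+nbn) ((5+nbn+nbn+nbn+7)/8) nbn hnb1 (by omega) (by omega) (by omega)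
    norm_num at hr4
    simp only [read_rect_py, read_rect_py_alt, hbyte0, hshr]
    rw [if_neg hnz]
    rw [hr0]
    dsimp only
    rw [if_neg hnz]
    rw [hr1]
    dsimp only
    rw [hr2]
    dsimp only
    rw [hr3]
    dsimp only
    rw [hr4]
    dsimp only
    rw [hfl, pv_fold_spec data off N hbz N le_rfl]
    rw [show ((N:Int) * 8 - (5 + (nbn:Int) * 4)).toNat = 8*N - (5+nbn*4) from by omega]
    rw [show ((3 * (nbn:Int))).toNat = 3*nbn from by omega,
        show ((2 * (nbn:Int))).toNat = 2*nbn from by omega,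
        show ((nbn:Int)).toNat = nbn from by omega,
        show ((nbn:Int) - 1).toNat = nbn - 1 from by omega]
    simp only [pv_shr, hone]
    have hdd : ∀ s t : Nat, pvAcc data off N / 2^t / 2^s = pvAcc data off N / 2^(t+s) :=
      fun s t => by rw [Int.ediv_ediv_eq_ediv_mul (by positivity), ← pow_add]
    rw [hdd, hdd, hdd]
    have hbm : ∀ (e : Nat), PySem.Int.band (pvAcc data off N / 2^e) (2^nbn - 1)
        = pvAcc data off N / 2^e % 2^nbn := fun e => by
      have h := pv_band_mask (pvAcc data off N / 2^e) nbn (Int.ediv_nonneg hFnn (by positivity))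
      rwa [hone nbn] at h
    rw [hbm, hbm, hbm, hbm]
    simp only [pvSext,
      show ((nbn:Int)).toNat = nbn from by omega,
      show ((nbn:Int) - 1).toNat = nbn - 1 from by omega, hone]
    rw [show 8*N - (5+nbn*4) + 3*nbn = 8*N - (5+nbn) from by omega,
        show 8*N - (5+nbn*4) + 2*nbn = 8*N - (5+nbn+nbn) from by omega,
        show 8*N - (5+nbn*4) + nbn = 8*N - (5+nbn+nbn+nbn) from by omega]
    rw [show 8*N - (5+nbn*4) = 8*N - (5+nbn+nbn+nbn+nbn) from by omega]
    rw [pv_prefix data off N hbz N le_rfl ((5+nbn+7)/8) (by omega) (5+nbn) (by omega),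
        pv_prefix data off N hbz N le_rfl ((5+nbn+nbn+7)/8) (by omega) (5+nbn+nbn) (by omega),
        pv_prefix data off N hbz N le_rfl ((5+nbn+nbn+nbn+7)/8) (by omega) (5+nbn+nbn+nbn) (by omega),
        pv_prefix data off N hbz N le_rfl ((5+nbn+nbn+nbn+nbn+7)/8) (by omega) (5+nbn+nbn+nbn+nbn) (by omega)]
    simp only [Prod.mk.injEq]
    refine ⟨trivial, trivial, trivial, trivial, ?_⟩
    omega
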